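-- pv_equiv track=rewrite | github.com/RobertoCaro/Automatizacion-Excel-Word | IdentificarTitulo.py | es_codigo_valido
-- ===== SOURCE A (Python) =====
-- def es_codigo_valido(txt):
--     txt = txt.strip()
--     if len(txt) < 5: return False
--     if ' ' in txt: return False
--     if '-' not in txt: return False
--     if not any(c.isalpha() for c in txt): return False
--     if not any(c.isdigit() for c in txt): return False
--     return True
-- ===== SOURCE B (Python) =====
-- def es_codigo_valido(txt):
--     txt = txt.strip()
--     if len(txt) < 5:
--         return False
--     has_space = has_dash = has_alpha = has_digit = False
--     for c in txt:
--         if c == ' ':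
--             has_space = True
--         if c == '-':
--             has_dash = True
--         if c.isalpha():
--             has_alpha = True
--         if c.isdigit():
--             has_digit = True
--     return not has_space and has_dash and has_alpha and has_digit
-- ===== Notes on version B (the rewrite author's own statement) =====
-- stated objective: alternative
-- what changed: Replaces A's four separate scans of the stripped string (two substring membership tests and two any() generator passes) with a single for-loop over the characters that accumulates four boolean flags and returns their conjunction.
import Mathlib
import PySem

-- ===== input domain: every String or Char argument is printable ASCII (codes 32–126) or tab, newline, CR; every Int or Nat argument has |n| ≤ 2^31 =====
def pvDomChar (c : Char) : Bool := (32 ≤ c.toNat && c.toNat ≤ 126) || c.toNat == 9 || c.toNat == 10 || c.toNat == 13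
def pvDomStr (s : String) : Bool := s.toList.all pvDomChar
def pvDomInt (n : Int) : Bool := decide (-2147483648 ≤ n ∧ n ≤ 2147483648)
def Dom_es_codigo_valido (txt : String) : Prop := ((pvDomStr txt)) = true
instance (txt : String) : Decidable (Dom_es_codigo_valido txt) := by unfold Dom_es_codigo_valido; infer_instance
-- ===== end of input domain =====

-- ===== PORT A =====
-- B changes only the decomposition: one pass with four flags instead of four scans (objective: alternative).
def es_codigo_valido (txt : String) : Bool :=
  let t := PySem.Str.strip txt
  if PySem.Str.len t < 5 then false
  else if PySem.Str.isIn " " t then false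
  else if !PySem.Str.isIn "-" t then false
  else if !(t.toList.any (fun c => PySem.Chars.isalpha c)) then false
  else if !(t.toList.any (fun c => PySem.Chars.isdigit c)) then false
  else true

-- ===== PORT B =====
def es_codigo_valido_alt (txt : String) : Bool :=
  let t := PySem.Str.strip txt
  if PySem.Str.len t < 5 then false
  else
    let flags := t.toList.foldl
      (fun (f : Bool × Bool × Bool × Bool) c =>
        ((if c == ' ' then true else f.1),
         (if c == '-' then true else f.2.1),
         (if PySem.Chars.isalpha c then true else f.2.2.1),
         (if PySem.Chars.isdigit c then true else f.2.2.2)))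
      (false, false, false, false)
    !flags.1 && flags.2.1 && flags.2.2.1 && flags.2.2.2

-- ===== PRECONDITION & SPEC =====
def Spec_es_codigo_valido (txt : String) (out : Bool) : Prop := out = es_codigo_valido_alt txt
instance (txt : String) (out : Bool) : Decidable (Spec_es_codigo_valido txt out) := by unfold Spec_es_codigo_valido; infer_instance

-- ===== CLAIM (what is proved, stated in full; the proofs are below) =====
def Claim_equal_es_codigo_valido : Prop := ∀ (txt : String), Dom_es_codigo_valido txt → Spec_es_codigo_valido txt (es_codigo_valido txt)

-- ===== LEMMAS AND PROOFS =====

-- ===== VERDICT (by name: the statement is the Claim_ definition above) =====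
lemma flags_foldl (l : List Char) (a b c d : Bool) :
    l.foldl
      (fun (f : Bool × Bool × Bool × Bool) ch =>
        ((if ch == ' ' then true else f.1),
         (if ch == '-' then true else f.2.1),
         (if PySem.Chars.isalpha ch then true else f.2.2.1),
         (if PySem.Chars.isdigit ch then true else f.2.2.2)))
      (a, b, c, d)
    = (a || l.any (· == ' '), b || l.any (· == '-'),
       c || l.any (fun ch => PySem.Chars.isalpha ch),
       d || l.any (fun ch => PySem.Chars.isdigit ch)) := by
  induction l generalizing a b c d with
  | nil => simp
  | cons x xs ih =>
    simp only [List.foldl_cons, ih, List.any_cons]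
    by_cases h1 : x == ' ' <;> by_cases h2 : x == '-' <;>
      by_cases h3 : PySem.Chars.isalpha x <;> by_cases h4 : PySem.Chars.isdigit x <;>
      simp [h1, h2, h3, h4]

lemma isIn_singleton (c : Char) (l : List Char) :
    PySem.Chars.isIn [c] l = l.any (· == c) := by
  rw [Bool.eq_iff_iff, PySem.Chars.isIn_iff_infix, List.any_eq_true]
  constructor
  · intro h
    exact ⟨c, h.subset (by simp), by simp⟩
  · rintro ⟨x, hx, he⟩
    obtain rfl : x = c := by simpa using he
    obtain ⟨s, t, rfl⟩ := List.append_of_mem hx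
    exact ⟨s, t, by simp⟩

lemma decide_forall_pred (p : Char → Bool) (l : List Char) :
    decide (∀ x ∈ l, p x = false) = !l.any p := by
  by_cases h : l.any p = true
  · simp only [h, Bool.not_true, decide_eq_false_iff_not, not_forall]
    obtain ⟨x, hx, hpx⟩ := List.any_eq_true.mp h
    exact ⟨x, hx, by simp [hpx]⟩
  · have h' := Bool.eq_false_iff.mpr (fun he => h he)
    simp only [h', Bool.not_false, decide_eq_true_eq]
    intro x hx
    exact Bool.eq_false_iff.mpr (fun hpx => h (List.any_eq_true.mpr ⟨x, hx, hpx⟩))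

lemma any_beq_eq_decide_mem (a : Char) (l : List Char) :
    (l.any fun x => x == a) = decide (a ∈ l) := by
  rw [Bool.eq_iff_iff, List.any_eq_true, decide_eq_true_eq]
  constructor
  · rintro ⟨x, hx, he⟩
    exact (beq_iff_eq.mp he) ▸ hx
  · intro h
    exact ⟨a, h, beq_self_eq_true a⟩

set_option maxHeartbeats 1000000 in
theorem es_codigo_valido_spec : Claim_equal_es_codigo_valido := by
  intro txt _
  unfold Spec_es_codigo_valido es_codigo_valido es_codigo_valido_alt
  simp only [PySem.Str.isIn_eq, show (" " : String).toList = [' '] from rfl,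
    show ("-" : String).toList = ['-'] from rfl, isIn_singleton, flags_foldl]
  simp [decide_forall_pred, any_beq_eq_decide_mem, Bool.and_assoc]
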